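-- pv_equiv track=rewrite | github.com/CDL-Project-Euler/solutions | problems26-50/problem_0031/inle_31.py | coin_sums
-- ===== SOURCE A (Python) =====
-- def coin_sums(total: int):
--     #All of the ways to combine british coins to get to total pence
--     count = 0
--     for two_pound in range(total // 200 + 1):
--         for one_pound in range((total-200*two_pound) // 100 + 1):
--             for fiftyp in range((total-200*two_pound - 100*one_pound) // 50 + 1):
--                 for twentyp in range((total-200*two_pound - 100*one_pound - 50 * fiftyp) // 20 + 1):
--                    for tenp in range((total-200*two_pound - 100*one_pound - 50 * fiftyp - 20*twentyp) // 10 + 1):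
--                        for fivep in range((total-200*two_pound - 100*one_pound - 50*fiftyp - 20*twentyp - 10*tenp) // 5 + 1):
--                            for _ in range((total-200*two_pound - 100*one_pound - 50*fiftyp - 20*twentyp - 10*tenp - 5*fivep) // 2 + 1):
--                                count += 1
--     return count
-- ===== SOURCE B (Python) =====
-- def coin_sums(total: int):
--     # Classic coin-change DP: one row over amounts, one pass per denomination.
--     if total < 0:
--         return 0
--     dp = [1] * (total + 1)          # ways using only 1p coins
--     for c in (2, 5, 10, 20, 50, 100, 200):
--         for i in range(c, total + 1):
--             dp[i] += dp[i - c]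
--     return dp[total]
-- ===== Notes on version B (the rewrite author's own statement) =====
-- stated objective: faster
-- what changed: Replaced A's seven nested loops over coin counts (enumerating every combination) by the standard one-row coin-change dynamic programme over amounts, one pass per denomination.
import Mathlib
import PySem

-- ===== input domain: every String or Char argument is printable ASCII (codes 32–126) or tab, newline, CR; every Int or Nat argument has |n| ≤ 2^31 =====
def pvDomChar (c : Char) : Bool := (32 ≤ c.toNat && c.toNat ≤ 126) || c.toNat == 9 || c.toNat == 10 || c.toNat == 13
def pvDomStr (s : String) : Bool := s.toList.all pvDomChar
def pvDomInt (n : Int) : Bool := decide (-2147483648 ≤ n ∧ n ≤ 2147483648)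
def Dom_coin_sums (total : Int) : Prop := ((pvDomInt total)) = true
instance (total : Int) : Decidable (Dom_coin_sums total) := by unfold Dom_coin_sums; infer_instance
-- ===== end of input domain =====

-- B replaces A's seven nested loops (O(total^7)) by the standard one-row coin-change DP
-- over amounts, one pass per denomination (O(total * #coins)).

-- ===== PORT A =====
def coin_sums (total : Int) : Int :=
  (PySem.List.pyRange 0 (PySem.Int.floordiv total 200 + 1) 1).foldl (fun count two_pound =>
    (PySem.List.pyRange 0 (PySem.Int.floordiv (total - 200 * two_pound) 100 + 1) 1).foldl (fun count one_pound =>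
      (PySem.List.pyRange 0 (PySem.Int.floordiv (total - 200 * two_pound - 100 * one_pound) 50 + 1) 1).foldl (fun count fiftyp =>
        (PySem.List.pyRange 0 (PySem.Int.floordiv (total - 200 * two_pound - 100 * one_pound - 50 * fiftyp) 20 + 1) 1).foldl (fun count twentyp =>
          (PySem.List.pyRange 0 (PySem.Int.floordiv (total - 200 * two_pound - 100 * one_pound - 50 * fiftyp - 20 * twentyp) 10 + 1) 1).foldl (fun count tenp =>
            (PySem.List.pyRange 0 (PySem.Int.floordiv (total - 200 * two_pound - 100 * one_pound - 50 * fiftyp - 20 * twentyp - 10 * tenp) 5 + 1) 1).foldl (fun count fivep =>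
              (PySem.List.pyRange 0 (PySem.Int.floordiv (total - 200 * two_pound - 100 * one_pound - 50 * fiftyp - 20 * twentyp - 10 * tenp - 5 * fivep) 2 + 1) 1).foldl (fun count _ =>
                count + 1) count) count) count) count) count) count) 0

-- ===== PORT B =====
def coin_sums_alt (total : Int) : Int :=
  if total < 0 then 0
  else
    let dp0 : List Int := List.replicate (total + 1).toNat 1
    let dp := ([2, 5, 10, 20, 50, 100, 200] : List Int).foldl (fun dp c =>
      (PySem.List.pyRange c (total + 1) 1).foldl (fun dp i =>
        PySem.List.pySetD dp i (PySem.List.pyGetD dp i 0 + PySem.List.pyGetD dp (i - c) 0)) dp) dp0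
    PySem.List.pyGetD dp total 0

-- ===== PRECONDITION & SPEC =====
def Spec_coin_sums (total : Int) (out : Int) : Prop := out = coin_sums_alt total
instance (total : Int) (out : Int) : Decidable (Spec_coin_sums total out) := by unfold Spec_coin_sums; infer_instance

-- ===== CLAIM (what is proved, stated in full; the proofs are below) =====
def Claim_equal_coin_sums : Prop := ∀ (total : Int), Dom_coin_sums total → Spec_coin_sums total (coin_sums total)

-- ===== LEMMAS AND PROOFS =====

-- Mathematical yardstick: number of ways to write n using coins cs (in order) plus 1p pieces.
def pvWays : List Nat → Nat → Int
  | [], _ => 1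
  | c :: cs, n => ((List.range (n / c + 1)).map fun k => pvWays cs (n - c * k)).sum

lemma pvWays_lt (c' : Nat) (cs : List Nat) (j : Nat) (hj : j < c') :
    pvWays (c' :: cs) j = pvWays cs j := by
  simp [pvWays, Nat.div_eq_of_lt hj]

lemma pvWays_rec (c' : Nat) (hc' : 0 < c') (cs : List Nat) (j : Nat) (hj : c' ≤ j) :
    pvWays (c' :: cs) j = pvWays cs j + pvWays (c' :: cs) (j - c') := by
  obtain ⟨m, rfl⟩ : ∃ m, j = c' + m := ⟨j - c', by omega⟩
  have hdiv : (c' + m) / c' = m / c' + 1 := by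
    rw [Nat.add_comm]; exact Nat.add_div_right m hc'
  have hsub : c' + m - c' = m := by omega
  rw [pvWays, hdiv, hsub, List.range_succ_eq_map]
  simp only [List.map_cons, List.sum_cons, List.map_map, Nat.mul_zero, Nat.sub_zero]
  congr 1
  rw [pvWays]
  refine congrArg List.sum (List.map_congr_left ?_)
  intro k _
  simp only [Function.comp_apply]
  congr 1
  rw [Nat.mul_succ]
  omega

-- One loop level of A: looping k over range(r // c + 1) and running `inner` with remainder r - c*k.
lemma pvLevel (r : Nat) (c : Int) (c' : Nat) (hc : c = (c' : Int)) (hc' : 0 < c')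
    (cs : List Nat) (inner : Int → Int → Int)
    (hinner : ∀ (count : Int) (m : Nat), inner count (m : Int) = count + pvWays cs m)
    (count : Int) :
    (PySem.List.pyRange 0 (PySem.Int.floordiv (r : Int) c + 1) 1).foldl
        (fun count k => inner count ((r : Int) - c * k)) count
      = count + pvWays (c' :: cs) r := by
  subst hc
  rw [show PySem.Int.floordiv (r : Int) (c' : Int) + 1 = ((r / c' + 1 : Nat) : Int) by
        rw [PySem.Int.floordiv_natCast]; push_cast; ring]
  rw [PySem.List.pyRange_zero_nat, List.foldl_map]
  rw [PySem.List.foldl_congr_mem _ _ (fun count k => count + pvWays cs (r - c' * k)) _ ?_]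
  · rw [PySem.List.foldl_add, pvWays]
  · intro acc k hk
    have hk' : k ≤ r / c' := by
      have := List.mem_range.mp hk; omega
    have hckr : c' * k ≤ r := by
      rw [Nat.mul_comm]; exact (Nat.le_div_iff_mul_le hc').mp hk'
    have : (r : Int) - (c' : Int) * (k : Int) = ((r - c' * k : Nat) : Int) := by
      push_cast [Nat.cast_sub hckr]; ring
    rw [this, hinner]

-- A's nested loops, abstracted as functions of the running remainder, innermost first.
def pvI2 : Int → Int → Int := fun count x =>
  (PySem.List.pyRange 0 (PySem.Int.floordiv x 2 + 1) 1).foldl (fun count _ => count + 1) count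
def pvI5 : Int → Int → Int := fun count x =>
  (PySem.List.pyRange 0 (PySem.Int.floordiv x 5 + 1) 1).foldl (fun count fivep => pvI2 count (x - 5 * fivep)) count
def pvI10 : Int → Int → Int := fun count x =>
  (PySem.List.pyRange 0 (PySem.Int.floordiv x 10 + 1) 1).foldl (fun count tenp => pvI5 count (x - 10 * tenp)) count
def pvI20 : Int → Int → Int := fun count x =>
  (PySem.List.pyRange 0 (PySem.Int.floordiv x 20 + 1) 1).foldl (fun count twentyp => pvI10 count (x - 20 * twentyp)) count
def pvI50 : Int → Int → Int := fun count x =>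
  (PySem.List.pyRange 0 (PySem.Int.floordiv x 50 + 1) 1).foldl (fun count fiftyp => pvI20 count (x - 50 * fiftyp)) count
def pvI100 : Int → Int → Int := fun count x =>
  (PySem.List.pyRange 0 (PySem.Int.floordiv x 100 + 1) 1).foldl (fun count one_pound => pvI50 count (x - 100 * one_pound)) count

lemma pvI2_eq (count : Int) (m : Nat) : pvI2 count (m : Int) = count + pvWays [2] m :=
  pvLevel m 2 2 rfl (by norm_num) [] (fun count _ => count + 1) (fun _ _ => rfl) count
lemma pvI5_eq (count : Int) (m : Nat) : pvI5 count (m : Int) = count + pvWays [5, 2] m :=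
  pvLevel m 5 5 rfl (by norm_num) [2] pvI2 pvI2_eq count
lemma pvI10_eq (count : Int) (m : Nat) : pvI10 count (m : Int) = count + pvWays [10, 5, 2] m :=
  pvLevel m 10 10 rfl (by norm_num) [5, 2] pvI5 pvI5_eq count
lemma pvI20_eq (count : Int) (m : Nat) : pvI20 count (m : Int) = count + pvWays [20, 10, 5, 2] m :=
  pvLevel m 20 20 rfl (by norm_num) [10, 5, 2] pvI10 pvI10_eq count
lemma pvI50_eq (count : Int) (m : Nat) : pvI50 count (m : Int) = count + pvWays [50, 20, 10, 5, 2] m :=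
  pvLevel m 50 50 rfl (by norm_num) [20, 10, 5, 2] pvI20 pvI20_eq count
lemma pvI100_eq (count : Int) (m : Nat) : pvI100 count (m : Int) = count + pvWays [100, 50, 20, 10, 5, 2] m :=
  pvLevel m 100 100 rfl (by norm_num) [50, 20, 10, 5, 2] pvI50 pvI50_eq count

lemma pvA_eq (n : Nat) : coin_sums (n : Int) = pvWays [200, 100, 50, 20, 10, 5, 2] n := by
  have := pvLevel n 200 200 rfl (by norm_num) [100, 50, 20, 10, 5, 2] pvI100 pvI100_eq 0
  simpa [pvI100, pvI50, pvI20, pvI10, pvI5, pvI2, coin_sums] using this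

-- B side: set on a mapped range.
lemma pvSet_map_range {β : Type} (f : Nat → β) (m j : Nat) (v : β) (_hj : j < m) :
    ((List.range m).map f).set j v = (List.range m).map fun i => if i = j then v else f i := by
  apply List.ext_getElem
  · simp
  · intro k h1 h2
    simp only [List.getElem_set, List.getElem_map, List.getElem_range]
    by_cases h : j = k
    · rw [if_pos h, if_pos h.symm]
    · rw [if_neg h, if_neg (fun hh => h hh.symm)]

-- One pass of B's inner loop, bounded at c' + t, preserves the DP invariant.
lemma pvStepAux (n c' : Nat) (hc' : 0 < c') (cs : List Nat) :
    ∀ t : Nat, c' + t ≤ n + 1 →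
    (PySem.List.pyRange (c' : Int) ((c' : Int) + (t : Int)) 1).foldl
        (fun dp i => PySem.List.pySetD dp i
          (PySem.List.pyGetD dp i 0 + PySem.List.pyGetD dp (i - (c' : Int)) 0))
        ((List.range (n + 1)).map fun i => pvWays cs i)
      = (List.range (n + 1)).map fun i => if i < c' + t then pvWays (c' :: cs) i else pvWays cs i := by
  intro t
  induction t with
  | zero =>
    intro _
    rw [Nat.cast_zero, add_zero, PySem.List.pyRange_one_eq_nil (le_refl _)]
    simp only [List.foldl_nil]
    apply List.map_congr_left
    intro i _
    split_ifs with h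
    · exact (pvWays_lt c' cs i (by omega)).symm
    · rfl
  | succ t ih =>
    intro ht
    rw [Nat.cast_add, Nat.cast_one, ← add_assoc]
    rw [PySem.List.pyRange_one_succ_right (by omega)]
    rw [List.foldl_append, ih (by omega)]
    simp only [List.foldl_cons, List.foldl_nil]
    rw [show (c' : Int) + (t : Int) = ((c' + t : Nat) : Int) by push_cast; ring]
    rw [show ((c' + t : Nat) : Int) - (c' : Int) = (t : Int) by push_cast; ring]
    rw [PySem.List.pyGetD_natCast, PySem.List.pyGetD_natCast, PySem.List.pySetD_natCast]
    rw [PySem.List.getD_map_range _ _ _ _ (by omega), PySem.List.getD_map_range _ _ _ _ (by omega)]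
    rw [pvSet_map_range _ _ _ _ (by omega)]
    apply List.map_congr_left
    intro i hi
    have hi' : i < n + 1 := List.mem_range.mp hi
    by_cases h1 : i = c' + t
    · subst h1
      rw [if_pos rfl, if_neg (by omega), if_pos (by omega), if_pos (by omega)]
      rw [pvWays_rec c' hc' cs (c' + t) (by omega)]
      have ht' : c' + t - c' = t := by omega
      rw [ht']
    · rw [if_neg h1]
      by_cases h2 : i < c' + t
      · rw [if_pos h2, if_pos (by omega)]
      · rw [if_neg h2, if_neg (by omega)]

lemma pvStep (n : Nat) (c : Int) (c' : Nat) (hc : c = (c' : Int)) (hc' : 0 < c') (cs : List Nat) :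
    (PySem.List.pyRange c ((n : Int) + 1) 1).foldl
        (fun dp i => PySem.List.pySetD dp i
          (PySem.List.pyGetD dp i 0 + PySem.List.pyGetD dp (i - c) 0))
        ((List.range (n + 1)).map fun i => pvWays cs i)
      = (List.range (n + 1)).map fun i => pvWays (c' :: cs) i := by
  subst hc
  by_cases hcn : c' ≤ n + 1
  · have h := pvStepAux n c' hc' cs (n + 1 - c') (by omega)
    rw [show (c' : Int) + ((n + 1 - c' : Nat) : Int) = (n : Int) + 1 by omega] at h
    rw [h]
    apply List.map_congr_left
    intro i hi
    rw [if_pos (by have := List.mem_range.mp hi; omega)]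
  · rw [PySem.List.pyRange_one_eq_nil (by omega)]
    simp only [List.foldl_nil]
    apply List.map_congr_left
    intro i hi
    exact (pvWays_lt c' cs i (by have := List.mem_range.mp hi; omega)).symm

lemma pvB_eq (n : Nat) : coin_sums_alt (n : Int) = pvWays [200, 100, 50, 20, 10, 5, 2] n := by
  unfold coin_sums_alt
  rw [if_neg (by omega)]
  have h0 : List.replicate (((n : Int) + 1).toNat) (1 : Int)
      = (List.range (n + 1)).map fun i => pvWays [] i := by
    rw [show ((n : Int) + 1).toNat = n + 1 by omega]
    rw [show (fun i => pvWays [] i) = fun _ : Nat => (1 : Int) from rfl]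
    simp [List.map_const']
  simp only [List.foldl_cons, List.foldl_nil, h0]
  rw [pvStep n 2 2 rfl (by norm_num) []]
  rw [pvStep n 5 5 rfl (by norm_num) [2]]
  rw [pvStep n 10 10 rfl (by norm_num) [5, 2]]
  rw [pvStep n 20 20 rfl (by norm_num) [10, 5, 2]]
  rw [pvStep n 50 50 rfl (by norm_num) [20, 10, 5, 2]]
  rw [pvStep n 100 100 rfl (by norm_num) [50, 20, 10, 5, 2]]
  rw [pvStep n 200 200 rfl (by norm_num) [100, 50, 20, 10, 5, 2]]
  rw [PySem.List.pyGetD_natCast, PySem.List.getD_map_range _ _ _ _ (by omega)]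

lemma pvA_neg (total : Int) (h : total < 0) : coin_sums total = 0 := by
  unfold coin_sums
  rw [PySem.List.pyRange_one_eq_nil ?_]
  · rfl
  · have : PySem.Int.floordiv total 200 < 0 :=
      (PySem.Int.floordiv_lt_iff_lt_mul (by norm_num)).mpr (by omega)
    omega

-- ===== VERDICT (by name: the statement is the Claim_ definition above) =====
theorem coin_sums_spec : Claim_equal_coin_sums := by
  intro total _
  unfold Spec_coin_sums
  by_cases h : total < 0
  · rw [pvA_neg total h]
    unfold coin_sums_alt
    rw [if_pos h]
  · obtain ⟨n, rfl⟩ : ∃ n : Nat, total = (n : Int) := ⟨total.toNat, by omega⟩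
    rw [pvA_eq, pvB_eq]
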